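-- pv_equiv track=rewrite | github.com/GundalaNikhil/DSA | dsa-problems/Bitwise/testcases/generate_all_testcases.py | bit003_and_skip_multiples
-- ===== SOURCE A (Python) =====
-- def bit003_and_skip_multiples(L: int, R: int, m: int) -> int:
--     """BIT-003: Bitwise AND Skipping Multiples"""
--     if R - L <= 2000000:
--         ans = -1
--         found = False
--         for i in range(L, R + 1):
--             if i % m != 0:
--                 if not found:
--                     ans = i
--                     found = True
--                 else:
--                     ans &= i
--         return ans if found else -1
--
--     # Large range
--     l_temp, r_temp = L, R
--     shift = 0
--     while l_temp != r_temp: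
--         l_temp >>= 1
--         r_temp >>= 1
--         shift += 1
--     standard_and = l_temp << shift
--
--     if m == 2:
--         standard_and |= 1
--     return standard_and
-- ===== SOURCE B (Python) =====
-- def _range_and(a, b):
--     # AND of all integers in [a, b] (a <= b): common binary prefix, zeros below.
--     if a < 0 and b >= 0:
--         return 0
--     s = (a ^ b).bit_length()
--     return (a >> s) << s
--
--
-- def bit003_and_skip_multiples(L: int, R: int, m: int) -> int:
--     """BIT-003: Bitwise AND Skipping Multiples"""
--     if R - L <= 2000000:
--         d = abs(m)
--         if d == 1:
--             return -1
--         ans = -1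
--         a = L
--         while a <= R:
--             if a % d == 0:
--                 a += 1
--             else:
--                 b = ((a // d) + 1) * d - 1  # last element of this gap of non-multiples
--                 if b > R:
--                     b = R
--                 ans &= _range_and(a, b)
--                 a = b + 2  # skip the multiple right after the gap
--         return ans
--
--     # Large range heuristic (kept from A): AND of the whole range, |1 if m == 2
--     base = _range_and(L, R)
--     if m == 2:
--         base |= 1
--     return base
-- ===== Notes on version B (the rewrite author's own statement) =====
-- stated objective: faster
-- what changed: Instead of scanning every element of [L,R] with a found-flag, B jumps from gap to gap between consecutive multiples of |m| and ANDs each whole gap at once with a closed-form common-prefix formula ((a^b).bit_length() shifts); the large-range heuristic's prefix loop is likewise replaced by the same closed form.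
import Mathlib
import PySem

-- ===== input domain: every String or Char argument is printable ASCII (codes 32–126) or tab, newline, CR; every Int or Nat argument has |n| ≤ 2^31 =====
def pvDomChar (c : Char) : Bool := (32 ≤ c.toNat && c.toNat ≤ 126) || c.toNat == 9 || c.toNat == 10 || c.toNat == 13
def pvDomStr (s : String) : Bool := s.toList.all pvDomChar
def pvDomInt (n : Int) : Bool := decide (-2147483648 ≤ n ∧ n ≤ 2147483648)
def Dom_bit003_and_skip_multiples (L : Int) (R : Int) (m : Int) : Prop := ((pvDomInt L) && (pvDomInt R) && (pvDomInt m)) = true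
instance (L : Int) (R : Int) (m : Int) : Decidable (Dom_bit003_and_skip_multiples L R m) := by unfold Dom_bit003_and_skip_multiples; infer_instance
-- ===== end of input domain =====

-- B replaces A's element-by-element scan by gap jumps between consecutive multiples of |m|,
-- ANDing each whole gap with a closed-form common-prefix formula; return values only (no mutation).

-- ===== PORT A =====
-- A's large-range `while l_temp != r_temp` loop, with a fuel guard for totality only
-- (under Pre_ the loop terminates well within 64 steps, so the fuel never runs out).
def pvAndLoopA : Nat → Int → Int → Nat → Int × Nat
  | 0, l, _, sh => (l, sh)
  | fuel+1, l, r, sh => if l = r then (l, sh) else pvAndLoopA fuel (l >>> (1:Nat)) (r >>> (1:Nat)) (sh + 1)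

def bit003_and_skip_multiples (L : Int) (R : Int) (m : Int) : Int :=
  if R - L ≤ 2000000 then
    let st := (PySem.List.pyRange L (R+1) 1).foldl
      (fun (st : Int × Bool) i =>
        if PySem.Int.mod i m ≠ 0 then
          if st.2 = false then (i, true) else (PySem.Int.band st.1 i, st.2)
        else st) (-1, false)
    if st.2 then st.1 else -1
  else
    let p := pvAndLoopA 64 L R 0
    let standard := p.1 <<< p.2
    if m = 2 then PySem.Int.bor standard 1 else standard

-- ===== PORT B =====
-- B's _range_and: AND of all integers in [a, b] (a ≤ b), closed form
def pvRangeAnd (a : Int) (b : Int) : Int :=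
  if a < 0 ∧ 0 ≤ b then 0
  else
    let s := PySem.Int.bitLength (PySem.Int.bxor a b)
    (a >>> s) <<< s

-- the last index of the gap of non-multiples of d that starts at a (Python's local b)
def pvGapEnd (R : Int) (d : Int) (a : Int) : Int :=
  if (PySem.Int.floordiv a d + 1) * d - 1 > R then R else (PySem.Int.floordiv a d + 1) * d - 1

-- B's `while a <= R` loop; fuel ((R+1-L).toNat + 1) bounds its trip count
def pvGapLoop (R : Int) (d : Int) : Nat → Int → Int → Int
  | 0, ans, _ => ans
  | fuel+1, ans, a =>
    if a ≤ R then
      if PySem.Int.mod a d = 0 then pvGapLoop R d fuel ans (a + 1)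
      else pvGapLoop R d fuel (PySem.Int.band ans (pvRangeAnd a (pvGapEnd R d a))) (pvGapEnd R d a + 2)
    else ans

def bit003_and_skip_multiples_alt (L : Int) (R : Int) (m : Int) : Int :=
  if R - L ≤ 2000000 then
    let d := |m|
    if d = 1 then -1
    else pvGapLoop R d ((R + 1 - L).toNat + 1) (-1) L
  else
    let base := pvRangeAnd L R
    if m = 2 then PySem.Int.bor base 1 else base

-- ===== PRECONDITION & SPEC =====
-- Pre_ excludes exactly the inputs on which Python A does not return: m = 0 with a nonempty
-- small range (ZeroDivisionError in `i % m`), and a large range with L < 0 ≤ R, on which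
-- A's `while l_temp != r_temp` shift loop never terminates (l_temp → -1, r_temp → 0).
def Pre_bit003_and_skip_multiples (L : Int) (R : Int) (m : Int) : Prop :=
  (R - L ≤ 2000000 → L ≤ R → m ≠ 0) ∧ (2000000 < R - L → (0 ≤ L ∨ R < 0))
instance (L : Int) (R : Int) (m : Int) : Decidable (Pre_bit003_and_skip_multiples L R m) := by
  unfold Pre_bit003_and_skip_multiples; infer_instance
def pvWitness_bit003_and_skip_multiples : Int × Int × Int := (0, 5, 2)

def Spec_bit003_and_skip_multiples (L : Int) (R : Int) (m : Int) (out : Int) : Prop := out = bit003_and_skip_multiples_alt L R m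
instance (L : Int) (R : Int) (m : Int) (out : Int) : Decidable (Spec_bit003_and_skip_multiples L R m out) := by unfold Spec_bit003_and_skip_multiples; infer_instance

-- ===== CLAIM (what is proved, stated in full; the proofs are below) =====
def Claim_equal_bit003_and_skip_multiples : Prop := ∀ (L : Int) (R : Int) (m : Int), Dom_bit003_and_skip_multiples L R m → Pre_bit003_and_skip_multiples L R m → Spec_bit003_and_skip_multiples L R m (bit003_and_skip_multiples L R m)

-- ===== LEMMAS AND PROOFS =====

-- ---------- a two's-complement bit view of PySem's Int bit operations ----------
def pvSg (x : Int) : Bool := decide (x < 0)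
def pvNb (x : Int) : Nat := if 0 ≤ x then x.toNat else (-x - 1).toNat
def pvTb (x : Int) (i : Nat) : Bool := xor (pvSg x) ((pvNb x).testBit i)

theorem pvNat_sub_and_testBit (i : Nat) : ∀ m n : Nat, (m - (m &&& n)).testBit i = (m.testBit i && !(n.testBit i)) := by
  induction i with
  | zero =>
    intro m n
    have h1 : m &&& n ≤ m := Nat.and_le_left
    have h3 : ((m &&& n) % 2 = 1) ↔ (m % 2 = 1 ∧ n % 2 = 1) := by
      simpa [Nat.testBit_zero] using Nat.testBit_and m n 0
    rcases Nat.mod_two_eq_zero_or_one m with hm | hm <;>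
      rcases Nat.mod_two_eq_zero_or_one n with hn | hn <;>
      simp [Nat.testBit_zero, hm, hn] <;> omega
  | succ j ih =>
    intro m n
    have h1 : m &&& n ≤ m := Nat.and_le_left
    have h2 : (m &&& n) / 2 = m / 2 &&& n / 2 := Nat.and_div_two
    have h2' : m / 2 &&& n / 2 ≤ m / 2 := Nat.and_le_left
    have h3 : ((m &&& n) % 2 = 1) ↔ (m % 2 = 1 ∧ n % 2 = 1) := by
      simpa [Nat.testBit_zero] using Nat.testBit_and m n 0
    have hdiv : (m - (m &&& n)) / 2 = m / 2 - (m / 2 &&& n / 2) := by omega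
    rw [Nat.testBit_succ, Nat.testBit_succ, Nat.testBit_succ, hdiv, ih]

theorem pvTb_nonneg {a : Int} (ha : 0 ≤ a) (i : Nat) : pvTb a i = (a.toNat).testBit i := by
  unfold pvTb pvSg pvNb
  rw [if_pos ha, decide_eq_false (by omega : ¬ a < 0)]
  simp

theorem pvTb_neg {a : Int} (ha : a < 0) (i : Nat) : pvTb a i = !(((-a - 1).toNat).testBit i) := by
  unfold pvTb pvSg pvNb
  rw [if_neg (by omega : ¬ 0 ≤ a), decide_eq_true ha]
  simp

theorem pvTb_band (a b : Int) (i : Nat) : pvTb (PySem.Int.band a b) i = (pvTb a i && pvTb b i) := by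
  unfold PySem.Int.band
  by_cases ha : 0 ≤ a <;> by_cases hb : 0 ≤ b <;> simp only [ha, hb, if_true, if_false]
  · rw [pvTb_nonneg (by positivity), pvTb_nonneg ha, pvTb_nonneg hb,
      Int.toNat_natCast, Nat.testBit_and]
  · rw [pvTb_nonneg (by positivity), pvTb_nonneg ha, pvTb_neg (by omega),
      Int.toNat_natCast, pvNat_sub_and_testBit]
  · rw [pvTb_nonneg (by positivity), pvTb_neg (by omega), pvTb_nonneg hb,
      Int.toNat_natCast, pvNat_sub_and_testBit]
    cases ((-a - 1).toNat).testBit i <;> cases (b.toNat).testBit i <;> rfl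
  · have hx : (0:Int) ≤ (((-a - 1).toNat ||| (-b - 1).toNat : Nat) : Int) := by positivity
    rw [pvTb_neg (by omega), pvTb_neg (by omega : a < 0), pvTb_neg (by omega : b < 0),
      show -(-((((-a - 1).toNat ||| (-b - 1).toNat : Nat)) : Int) - 1) - 1 = ((((-a - 1).toNat ||| (-b - 1).toNat : Nat)) : Int) by ring,
      Int.toNat_natCast, Nat.testBit_or]
    cases ((-a - 1).toNat).testBit i <;> cases ((-b - 1).toNat).testBit i <;> rfl

theorem pvTb_bxor (a b : Int) (i : Nat) : pvTb (PySem.Int.bxor a b) i = xor (pvTb a i) (pvTb b i) := by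
  unfold PySem.Int.bxor
  by_cases ha : 0 ≤ a <;> by_cases hb : 0 ≤ b <;> simp only [ha, hb, if_true, if_false]
  · rw [pvTb_nonneg (by positivity), pvTb_nonneg ha, pvTb_nonneg hb,
      Int.toNat_natCast, Nat.testBit_xor]
  · have hx : (0:Int) ≤ ((a.toNat ^^^ (-b - 1).toNat : Nat) : Int) := by positivity
    rw [pvTb_neg (by omega), pvTb_nonneg ha, pvTb_neg (by omega : b < 0),
      show -(-(((a.toNat ^^^ (-b - 1).toNat : Nat)) : Int) - 1) - 1 = (((a.toNat ^^^ (-b - 1).toNat : Nat)) : Int) by ring,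
      Int.toNat_natCast, Nat.testBit_xor]
    cases (a.toNat).testBit i <;> cases ((-b - 1).toNat).testBit i <;> rfl
  · have hx : (0:Int) ≤ ((((-a - 1).toNat ^^^ b.toNat : Nat)) : Int) := by positivity
    rw [pvTb_neg (by omega), pvTb_neg (by omega : a < 0), pvTb_nonneg hb,
      show -(-((((-a - 1).toNat ^^^ b.toNat : Nat)) : Int) - 1) - 1 = ((((-a - 1).toNat ^^^ b.toNat : Nat)) : Int) by ring,
      Int.toNat_natCast, Nat.testBit_xor]
    cases ((-a - 1).toNat).testBit i <;> cases (b.toNat).testBit i <;> rfl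
  · rw [pvTb_nonneg (by positivity), pvTb_neg (by omega : a < 0), pvTb_neg (by omega : b < 0),
      Int.toNat_natCast, Nat.testBit_xor]
    cases ((-a - 1).toNat).testBit i <;> cases ((-b - 1).toNat).testBit i <;> rfl

theorem pvTb_ext {x y : Int} (h : ∀ i, pvTb x i = pvTb y i) : x = y := by
  have hs : pvSg x = pvSg y := by
    have hi := h (pvNb x + pvNb y)
    have hx : (pvNb x).testBit (pvNb x + pvNb y) = false :=
      Nat.testBit_eq_false_of_lt (lt_of_lt_of_le (Nat.lt_two_pow_self)
        (Nat.pow_le_pow_right (by norm_num) (by omega)))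
    have hy : (pvNb y).testBit (pvNb x + pvNb y) = false :=
      Nat.testBit_eq_false_of_lt (lt_of_lt_of_le (Nat.lt_two_pow_self)
        (Nat.pow_le_pow_right (by norm_num) (by omega)))
    simpa [pvTb, hx, hy] using hi
  have hn : pvNb x = pvNb y := by
    apply Nat.eq_of_testBit_eq
    intro i
    have := h i
    unfold pvTb at this
    rw [hs] at this
    cases hsy : pvSg y <;> rw [hsy] at this <;> simpa using this
  unfold pvSg at hs
  unfold pvNb at hn
  by_cases hx : 0 ≤ x <;> by_cases hy : 0 ≤ y <;>
    simp only [hx, hy, if_true, if_false] at hn <;>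
    first
      | omega
      | (exfalso; have := congrArg (fun b => b = true) hs; simp [decide_eq_true_eq] at hs <;> omega)

theorem pvTb_double (x : Int) (p : Int) (hp : p = 0 ∨ p = 1) :
    ∀ i, pvTb (2 * x + p) i = if i = 0 then decide (p = 1) else pvTb x (i - 1) := by
  intro i
  by_cases hx : 0 ≤ x
  · have h0 : 0 ≤ 2 * x + p := by omega
    have ht : (2 * x + p).toNat = 2 * x.toNat + p.toNat := by omega
    rw [pvTb_nonneg h0, ht]
    cases i with
    | zero =>
      rcases hp with h | h <;> subst h <;> simp [Nat.testBit_zero] <;> omega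
    | succ j =>
      rw [Nat.testBit_succ, pvTb_nonneg hx]
      rcases hp with h | h <;> subst h <;> simp <;> congr 1 <;> omega
  · have h0 : 2 * x + p < 0 := by omega
    have ht : (-(2 * x + p) - 1).toNat = 2 * (-x - 1).toNat + (1 - p).toNat := by omega
    rw [pvTb_neg h0, ht]
    cases i with
    | zero =>
      rcases hp with h | h <;> subst h <;> simp [Nat.testBit_zero] <;> omega
    | succ j =>
      rw [Nat.testBit_succ, pvTb_neg (by omega)]
      rcases hp with h | h <;> subst h <;> simp <;> congr 2 <;> omega

theorem pvBand_assoc (a b c : Int) : PySem.Int.band (PySem.Int.band a b) c = PySem.Int.band a (PySem.Int.band b c) := by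
  apply pvTb_ext; intro i
  simp [pvTb_band, Bool.and_assoc]

theorem pvBand_double (x y p q : Int) (hp : p = 0 ∨ p = 1) (hq : q = 0 ∨ q = 1) :
    PySem.Int.band (2 * x + p) (2 * y + q) = 2 * PySem.Int.band x y + (if p = 1 ∧ q = 1 then 1 else 0) := by
  apply pvTb_ext; intro i
  rw [pvTb_band, pvTb_double x p hp, pvTb_double y q hq,
    pvTb_double (PySem.Int.band x y) _ (by rcases hp with h|h <;> rcases hq with h'|h' <;> simp [h, h'])]
  by_cases hi : i = 0
  · subst hi
    rcases hp with h|h <;> rcases hq with h'|h' <;> simp [h, h']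
  · simp [hi, pvTb_band]

theorem pvBxor_double (x y p q : Int) (hp : p = 0 ∨ p = 1) (hq : q = 0 ∨ q = 1) :
    PySem.Int.bxor (2 * x + p) (2 * y + q) = 2 * PySem.Int.bxor x y + (if p = q then 0 else 1) := by
  apply pvTb_ext; intro i
  rw [pvTb_bxor, pvTb_double x p hp, pvTb_double y q hq,
    pvTb_double (PySem.Int.bxor x y) _ (by rcases hp with h|h <;> rcases hq with h'|h' <;> simp [h, h'])]
  by_cases hi : i = 0
  · subst hi
    rcases hp with h|h <;> rcases hq with h'|h' <;> simp [h, h'] <;> omega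
  · simp [hi, pvTb_bxor]

theorem pvBxor_eq_zero_iff (a b : Int) : PySem.Int.bxor a b = 0 ↔ a = b := by
  constructor
  · intro h
    apply pvTb_ext; intro i
    have h2 : pvTb (PySem.Int.bxor a b) i = false := by
      rw [h, pvTb_nonneg le_rfl]
      simp
    rw [pvTb_bxor] at h2
    cases h3 : pvTb a i <;> cases h4 : pvTb b i <;> simp [h3, h4] at h2 <;> rfl
  · intro h; subst h; exact PySem.Int.bxor_self a

theorem pvBxor_nonneg (a b : Int) (hab : (0 ≤ a ∧ 0 ≤ b) ∨ (a < 0 ∧ b < 0)) :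
    0 ≤ PySem.Int.bxor a b := by
  unfold PySem.Int.bxor
  rcases hab with ⟨h1, h2⟩ | ⟨h1, h2⟩
  · rw [if_pos h1, if_pos h2]; positivity
  · rw [if_neg (by omega), if_neg (by omega)]; positivity

theorem pvBxor_natAbs_lt (a b : Int) (ha : a.natAbs < 2 ^ 62) (hb : b.natAbs < 2 ^ 62) :
    (PySem.Int.bxor a b).natAbs < 2 ^ 64 := by
  have h1 : a.toNat < 2 ^ 62 := by omega
  have h2 : b.toNat < 2 ^ 62 := by omega
  have h3 : (-a - 1).toNat < 2 ^ 62 := by omega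
  have h4 : (-b - 1).toNat < 2 ^ 62 := by omega
  have e1 := Nat.xor_lt_two_pow (n := 62) h1 h2
  have e2 := Nat.xor_lt_two_pow (n := 62) h1 h4
  have e3 := Nat.xor_lt_two_pow (n := 62) h3 h2
  have e4 := Nat.xor_lt_two_pow (n := 62) h3 h4
  unfold PySem.Int.bxor
  by_cases hx : 0 ≤ a <;> by_cases hy : 0 ≤ b <;> simp only [hx, hy, if_true, if_false] <;> omega

theorem pvBitLength_le {x : Int} {k : Nat} (h : x.natAbs < 2 ^ k) : PySem.Int.bitLength x ≤ k := by
  by_cases hx : x = 0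
  · subst hx; simp [PySem.Int.bitLength_zero]
  · by_contra h'
    have h1 : 2 ^ k ≤ 2 ^ (PySem.Int.bitLength x - 1) := Nat.pow_le_pow_right (by norm_num) (by omega)
    have h2 := PySem.Int.two_pow_bitLength_le x hx
    omega

-- ---------- list AND ----------
def pvListAnd (l : List Int) : Int := l.foldl PySem.Int.band (-1)

theorem pvBand_neg_one_left (x : Int) : PySem.Int.band (-1) x = x := by
  rw [PySem.Int.band_comm]; exact PySem.Int.band_neg_one x

theorem pvFoldl_band (l : List Int) : ∀ x : Int, l.foldl PySem.Int.band x = PySem.Int.band x (pvListAnd l) := by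
  induction l with
  | nil => intro x; simp [pvListAnd, PySem.Int.band_neg_one]
  | cons a t ih =>
    intro x
    show t.foldl PySem.Int.band (PySem.Int.band x a) = _
    rw [ih (PySem.Int.band x a)]
    have h2 : pvListAnd (a :: t) = PySem.Int.band a (pvListAnd t) := by
      show t.foldl PySem.Int.band (PySem.Int.band (-1) a) = _
      rw [ih, pvBand_neg_one_left]
    rw [h2, pvBand_assoc]

theorem pvListAnd_append (p q : List Int) : pvListAnd (p ++ q) = PySem.Int.band (pvListAnd p) (pvListAnd q) := by
  unfold pvListAnd
  rw [List.foldl_append, pvFoldl_band]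
  rfl

theorem pvListAnd_cons (a : Int) (l : List Int) : pvListAnd (a :: l) = PySem.Int.band a (pvListAnd l) := by
  show l.foldl PySem.Int.band (PySem.Int.band (-1) a) = _
  rw [pvFoldl_band, pvBand_neg_one_left]

theorem pvListAnd_singleton (a : Int) : pvListAnd [a] = a := by
  simp [pvListAnd, pvBand_neg_one_left]

theorem pvRange_nil {p q : Int} (h : q ≤ p) : PySem.List.pyRange p q = [] := by
  simp [pysem, h]

theorem pvRange_split (n : Nat) : ∀ a c b : Int, (c - a).toNat = n → a ≤ c → c ≤ b →
    PySem.List.pyRange a b = PySem.List.pyRange a c ++ PySem.List.pyRange c b := by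
  induction n with
  | zero =>
    intro a c b hn h1 h2
    have : a = c := by omega
    subst this
    rw [pvRange_nil le_rfl, List.nil_append]
  | succ k ih =>
    intro a c b hn h1 h2
    have hac : a < c := by omega
    rw [PySem.List.pyRange_one_cons (by omega : a < b), PySem.List.pyRange_one_cons hac,
      List.cons_append, ih (a+1) c b (by omega) (by omega) h2]

-- AND of the contiguous block [2u .. 2v+1]
theorem pvEO (n : Nat) : ∀ u v : Int, (v - u).toNat = n → u ≤ v →
    pvListAnd (PySem.List.pyRange (2 * u) (2 * v + 2)) = 2 * pvListAnd (PySem.List.pyRange u (v + 1)) := by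
  induction n with
  | zero =>
    intro u v hn h
    have : u = v := by omega
    subst this
    have h1 : PySem.List.pyRange (2*u) (2*u+2) = [2*u, 2*u+1] := by
      rw [PySem.List.pyRange_one_cons (by omega), PySem.List.pyRange_one_cons (by omega),
        pvRange_nil (by omega)]
    have h2 : PySem.List.pyRange u (u+1) = [u] := by
      rw [PySem.List.pyRange_one_cons (by omega), pvRange_nil (by omega)]
    rw [h1, h2, pvListAnd_cons, pvListAnd_singleton, pvListAnd_singleton]
    have := pvBand_double u u 0 1 (Or.inl rfl) (Or.inr rfl)
    simpa [PySem.Int.band_self] using this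
  | succ k ih =>
    intro u v hn h
    have huv : u < v := by omega
    have hsplit : PySem.List.pyRange (2*u) (2*v+2) =
        PySem.List.pyRange (2*u) (2*v) ++ PySem.List.pyRange (2*v) (2*v+2) := by
      exact pvRange_split ((2*v - 2*u).toNat) (2*u) (2*v) (2*v+2) rfl (by omega) (by omega)
    have htail : PySem.List.pyRange (2*v) (2*v+2) = [2*v, 2*v+1] := by
      rw [PySem.List.pyRange_one_cons (by omega), PySem.List.pyRange_one_cons (by omega),
        pvRange_nil (by omega)]
    have hIH : pvListAnd (PySem.List.pyRange (2*u) (2*v)) = 2 * pvListAnd (PySem.List.pyRange u v) := by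
      have h1 := ih u (v-1) (by omega) (by omega)
      have e1 : 2*(v-1)+2 = 2*v := by ring
      have e2 : v - 1 + 1 = v := by ring
      rw [e1, e2] at h1
      exact h1
    rw [hsplit, htail, pvListAnd_append, hIH, pvListAnd_cons, pvListAnd_singleton]
    have hpair : PySem.Int.band (2*v) (2*v+1) = 2*v := by
      have := pvBand_double v v 0 1 (Or.inl rfl) (Or.inr rfl)
      simpa [PySem.Int.band_self] using this
    rw [hpair]
    have hdd : PySem.Int.band (2 * pvListAnd (PySem.List.pyRange u v)) (2*v)
        = 2 * PySem.Int.band (pvListAnd (PySem.List.pyRange u v)) v := by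
      have := pvBand_double (pvListAnd (PySem.List.pyRange u v)) v 0 0 (Or.inl rfl) (Or.inl rfl)
      simpa using this
    rw [hdd]
    congr 1
    rw [PySem.List.pyRange_one_succ_right (by omega : u ≤ v), pvListAnd_append, pvListAnd_singleton]

-- AND of the contiguous block [2u .. 2v]
theorem pvEE (u v : Int) (h : u ≤ v) :
    pvListAnd (PySem.List.pyRange (2 * u) (2 * v + 1)) = 2 * pvListAnd (PySem.List.pyRange u (v + 1)) := by
  rcases eq_or_lt_of_le h with heq | hlt
  · subst heq
    have h1 : PySem.List.pyRange (2*u) (2*u+1) = [2*u] := by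
      rw [PySem.List.pyRange_one_cons (by omega), pvRange_nil (by omega)]
    have h2 : PySem.List.pyRange u (u+1) = [u] := by
      rw [PySem.List.pyRange_one_cons (by omega), pvRange_nil (by omega)]
    rw [h1, h2, pvListAnd_singleton, pvListAnd_singleton]
  · have hsplit : PySem.List.pyRange (2*u) (2*v+1) =
        PySem.List.pyRange (2*u) (2*v) ++ PySem.List.pyRange (2*v) (2*v+1) := by
      exact pvRange_split ((2*v - 2*u).toNat) (2*u) (2*v) (2*v+1) rfl (by omega) (by omega)
    have htail : PySem.List.pyRange (2*v) (2*v+1) = [2*v] := by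
      rw [PySem.List.pyRange_one_cons (by omega), pvRange_nil (by omega)]
    have hIH : pvListAnd (PySem.List.pyRange (2*u) (2*v)) = 2 * pvListAnd (PySem.List.pyRange u v) := by
      have h1 := pvEO ((v-1-u).toNat) u (v-1) rfl (by omega)
      have e1 : 2*(v-1)+2 = 2*v := by ring
      have e2 : v - 1 + 1 = v := by ring
      rw [e1, e2] at h1
      exact h1
    rw [hsplit, htail, pvListAnd_append, hIH, pvListAnd_singleton]
    have hdd : PySem.Int.band (2 * pvListAnd (PySem.List.pyRange u v)) (2*v)
        = 2 * PySem.Int.band (pvListAnd (PySem.List.pyRange u v)) v := by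
      have := pvBand_double (pvListAnd (PySem.List.pyRange u v)) v 0 0 (Or.inl rfl) (Or.inl rfl)
      simpa using this
    rw [hdd]
    congr 1
    rw [PySem.List.pyRange_one_succ_right (by omega : u ≤ v), pvListAnd_append, pvListAnd_singleton]

-- a parity decomposition helper
theorem pvParity (a : Int) : ∃ u p : Int, (p = 0 ∨ p = 1) ∧ a = 2 * u + p := by
  refine ⟨a / 2, a % 2, by omega, by omega⟩

theorem pvHalfShift (s : Nat) (a u p : Int) (hp : p = 0 ∨ p = 1) (ha : a = 2 * u + p) :
    a >>> (s + 1) = u >>> s := by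
  rw [Int.shiftRight_eq_div_pow, Int.shiftRight_eq_div_pow]
  have h1 : ((2:Int)) ^ (s+1) = 2 ^ s * 2 := by ring
  push_cast
  rw [h1, mul_comm ((2:Int)^s) 2, ← Int.ediv_ediv_of_nonneg (by norm_num)]
  congr 1
  omega

theorem pvRangeAnd_spec (s : Nat) : ∀ a b : Int, a ≤ b → (0 ≤ a ∧ 0 ≤ b) ∨ (a < 0 ∧ b < 0) →
    PySem.Int.bitLength (PySem.Int.bxor a b) = s →
    pvListAnd (PySem.List.pyRange a (b + 1)) = (a >>> s) <<< s := by
  induction s with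
  | zero =>
    intro a b hab hsign hbl
    have h1 : (PySem.Int.bxor a b).natAbs < 1 := by
      have := PySem.Int.lt_two_pow_bitLength (PySem.Int.bxor a b)
      rw [hbl] at this
      simpa using this
    have h2 : a = b := (pvBxor_eq_zero_iff a b).mp (by omega)
    subst h2
    rw [PySem.List.pyRange_one_cons (by omega), pvRange_nil (by omega), pvListAnd_singleton]
    simp [Int.shiftRight_eq_div_pow, Int.shiftLeft_eq]
  | succ s ih =>
    intro a b hab hsign hbl
    have hne : a ≠ b := by
      intro h
      subst h
      rw [PySem.Int.bxor_self, PySem.Int.bitLength_zero] at hbl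
      omega
    have hlt : a < b := by omega
    obtain ⟨u, p, hp, hu⟩ := pvParity a
    obtain ⟨v, q, hq, hv⟩ := pvParity b
    have huv : u ≤ v := by omega
    have hX : PySem.Int.bxor a b = 2 * PySem.Int.bxor u v + (if p = q then 0 else 1) := by
      rw [hu, hv]; exact pvBxor_double u v p q hp hq
    have hXpos : 0 < PySem.Int.bxor a b := by
      have h0 : 0 ≤ PySem.Int.bxor a b := pvBxor_nonneg a b hsign
      have : PySem.Int.bxor a b ≠ 0 := fun h => hne ((pvBxor_eq_zero_iff a b).mp h)
      omega
    have hY : 0 ≤ PySem.Int.bxor u v := by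
      apply pvBxor_nonneg
      rcases hsign with ⟨h1, h2⟩ | ⟨h1, h2⟩
      · left; constructor <;> omega
      · right; constructor <;> omega
    have hfd : PySem.Int.floordiv (PySem.Int.bxor a b) 2 = PySem.Int.bxor u v := by
      rw [PySem.Int.floordiv_eq_ediv_of_pos (by norm_num)]
      rcases hq with h | h <;> rcases hp with h' | h' <;> omega
    have hbl2 : PySem.Int.bitLength (PySem.Int.bxor u v) = s := by
      have := PySem.Int.bitLength_of_pos hXpos
      rw [hfd, hbl] at this
      omega
    have hsign2 : (0 ≤ u ∧ 0 ≤ v) ∨ (u < 0 ∧ v < 0) := by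
      rcases hsign with ⟨h1, h2⟩ | ⟨h1, h2⟩
      · left; constructor <;> omega
      · right; constructor <;> omega
    have hIH := ih u v huv hsign2 hbl2
    -- four parity cases: the list AND halves
    have hhalf : pvListAnd (PySem.List.pyRange a (b + 1)) = 2 * pvListAnd (PySem.List.pyRange u (v + 1)) := by
      rcases hp with hp0 | hp1 <;> rcases hq with hq0 | hq1
      · rw [show a = 2*u by omega, show b + 1 = 2*v + 1 by omega]
        exact pvEE u v huv
      · rw [show a = 2*u by omega, show b + 1 = 2*v + 2 by omega]
        exact pvEO (v - u).toNat u v rfl huv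
      · have huv' : u < v := by omega
        rw [PySem.List.pyRange_one_cons (by omega : a < b + 1), pvListAnd_cons,
          show a + 1 = 2*(u+1) by omega, show b + 1 = 2*v + 1 by omega,
          pvEE (u+1) v (by omega), show a = 2*u+1 by omega]
        have hbd := pvBand_double u (pvListAnd (PySem.List.pyRange (u+1) (v+1))) 1 0 (Or.inr rfl) (Or.inl rfl)
        norm_num at hbd
        rw [hbd, ← pvListAnd_cons, ← PySem.List.pyRange_one_cons (by omega : u < v + 1)]
      · have huv' : u < v := by omega
        rw [PySem.List.pyRange_one_cons (by omega : a < b + 1), pvListAnd_cons,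
          show a + 1 = 2*(u+1) by omega, show b + 1 = 2*v + 2 by omega,
          pvEO (v - (u+1)).toNat (u+1) v rfl (by omega), show a = 2*u+1 by omega]
        have hbd := pvBand_double u (pvListAnd (PySem.List.pyRange (u+1) (v+1))) 1 0 (Or.inr rfl) (Or.inl rfl)
        norm_num at hbd
        rw [hbd, ← pvListAnd_cons, ← PySem.List.pyRange_one_cons (by omega : u < v + 1)]
    rw [hhalf, hIH]
    rw [pvHalfShift s a u p hp hu, Int.shiftLeft_eq, Int.shiftLeft_eq]
    push_cast
    ring

-- ---------- the two loops ----------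
-- A's small branch is the AND of the non-multiples, folded with a found-flag
theorem pvA_flag (m : Int) (l : List Int) : ∀ x : Int,
    l.foldl (fun (st : Int × Bool) i =>
        if PySem.Int.mod i m ≠ 0 then
          if st.2 = false then (i, true) else (PySem.Int.band st.1 i, st.2)
        else st) (x, true)
      = (l.foldl (fun y i => if PySem.Int.mod i m ≠ 0 then PySem.Int.band y i else y) x, true) := by
  induction l with
  | nil => intro x; rfl
  | cons a t ih =>
    intro x
    simp only [List.foldl_cons]
    by_cases h : PySem.Int.mod a m ≠ 0
    · rw [if_pos h, if_pos h, if_neg (by simp : ¬ (true = false))]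
      exact ih _
    · rw [if_neg h, if_neg h]
      exact ih x

theorem pvG_filter (m : Int) (l : List Int) : ∀ x : Int,
    l.foldl (fun y i => if PySem.Int.mod i m ≠ 0 then PySem.Int.band y i else y) x
      = (l.filter (fun i => decide (PySem.Int.mod i m ≠ 0))).foldl PySem.Int.band x := by
  induction l with
  | nil => intro x; rfl
  | cons a t ih =>
    intro x
    simp only [List.foldl_cons, List.filter_cons]
    by_cases h : PySem.Int.mod a m ≠ 0
    · rw [if_pos h, if_pos (by simp [h] : decide (PySem.Int.mod a m ≠ 0) = true), List.foldl_cons]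
      exact ih _
    · rw [if_neg h, if_neg (by simp [h] : ¬ decide (PySem.Int.mod a m ≠ 0) = true)]
      exact ih x

theorem pvA_small (m : Int) (l : List Int) :
    (if (l.foldl (fun (st : Int × Bool) i =>
        if PySem.Int.mod i m ≠ 0 then
          if st.2 = false then (i, true) else (PySem.Int.band st.1 i, st.2)
        else st) (-1, false)).2
      then (l.foldl (fun (st : Int × Bool) i =>
        if PySem.Int.mod i m ≠ 0 then
          if st.2 = false then (i, true) else (PySem.Int.band st.1 i, st.2)
        else st) (-1, false)).1
      else -1)
      = pvListAnd (l.filter (fun i => decide (PySem.Int.mod i m ≠ 0))) := by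
  induction l with
  | nil => rfl
  | cons a t ih =>
    simp only [List.foldl_cons, List.filter_cons]
    by_cases h : PySem.Int.mod a m ≠ 0
    · rw [if_pos h, if_pos trivial,
        if_pos (by simp [h] : decide (PySem.Int.mod a m ≠ 0) = true),
        pvA_flag, pvListAnd_cons]
      rw [pvG_filter, pvFoldl_band]
      simp
    · rw [if_neg h,
        if_neg (by simp [h] : ¬ decide (PySem.Int.mod a m ≠ 0) = true)]
      exact ih

-- B's gap loop computes the same AND
theorem pvGapLoop_spec (m R d : Int) (hd : d = |m|) (h2 : 2 ≤ d) :
    ∀ (fuel : Nat) (a ans : Int), (R + 1 - a).toNat < fuel →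
    pvGapLoop R d fuel ans a =
      PySem.Int.band ans (pvListAnd ((PySem.List.pyRange a (R+1)).filter (fun i => decide (PySem.Int.mod i m ≠ 0)))) := by
  have hdvd : ∀ i : Int, (PySem.Int.mod i d = 0) ↔ (PySem.Int.mod i m = 0) := by
    intro i
    rw [PySem.Int.mod_eq_zero_iff_dvd, PySem.Int.mod_eq_zero_iff_dvd, hd, abs_dvd]
  intro fuel
  induction fuel with
  | zero => intro a ans h; omega
  | succ fuel ih =>
    intro a ans hfuel
    by_cases haR : a ≤ R
    case neg =>
      simp only [pvGapLoop, if_neg haR]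
      rw [pvRange_nil (by omega), List.filter_nil]
      show ans = PySem.Int.band ans (-1)
      rw [PySem.Int.band_neg_one]
    case pos =>
      by_cases hmod : PySem.Int.mod a d = 0
      · simp only [pvGapLoop, if_pos haR, if_pos hmod]
        rw [ih (a+1) ans (by omega),
          PySem.List.pyRange_one_cons (by omega : a < R + 1), List.filter_cons,
          if_neg (by simp [← hdvd, hmod] : ¬ decide (PySem.Int.mod a m ≠ 0) = true)]
      · simp only [pvGapLoop, if_pos haR, if_neg hmod]
        have hmod_pos : 0 < PySem.Int.mod a d := by
          have := PySem.Int.mod_nonneg a (by omega : (0:Int) < d)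
          omega
        have hmod_lt : PySem.Int.mod a d < d := PySem.Int.mod_lt a (by omega)
        have hfda := PySem.Int.floordiv_mul_add_mod a d
        have hexp : (PySem.Int.floordiv a d + 1) * d = PySem.Int.floordiv a d * d + d := by ring
        have hbfacts : a ≤ pvGapEnd R d a ∧ pvGapEnd R d a ≤ R ∧
            pvGapEnd R d a ≤ (PySem.Int.floordiv a d + 1) * d - 1 ∧
            (pvGapEnd R d a + 1 ≤ R → pvGapEnd R d a = (PySem.Int.floordiv a d + 1) * d - 1) := by
          unfold pvGapEnd
          split_ifs <;> omega
        obtain ⟨hab, hbR, hble, hbeq⟩ := hbfacts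
        have hgap : ∀ i : Int, a ≤ i → i ≤ pvGapEnd R d a → ¬ (d ∣ i) := by
          intro i h1 h3 hdk
          obtain ⟨k, hk⟩ := hdk
          have hkk : d * k = k * d := by ring
          have h5 : PySem.Int.floordiv a d * d < k * d := by omega
          have h6 : k * d < (PySem.Int.floordiv a d + 1) * d := by omega
          have h7 : PySem.Int.floordiv a d < k := lt_of_mul_lt_mul_right h5 (by omega)
          have h8 : k < PySem.Int.floordiv a d + 1 := lt_of_mul_lt_mul_right h6 (by omega)
          omega
        have hsign : (0 ≤ a ∧ 0 ≤ pvGapEnd R d a) ∨ (a < 0 ∧ pvGapEnd R d a < 0) := by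
          by_cases ha0 : 0 ≤ a
          · left; exact ⟨ha0, by omega⟩
          · right
            refine ⟨by omega, ?_⟩
            by_contra hb0'
            exact hgap 0 (by omega) (by omega) ⟨0, by ring⟩
        have hguard : ¬ (a < 0 ∧ 0 ≤ pvGapEnd R d a) := by
          rcases hsign with ⟨h1', h2'⟩ | ⟨h1', h2'⟩ <;> omega
        have hra : pvRangeAnd a (pvGapEnd R d a) = pvListAnd (PySem.List.pyRange a (pvGapEnd R d a + 1)) := by
          rw [pvRangeAnd, if_neg hguard,
            pvRangeAnd_spec (PySem.Int.bitLength (PySem.Int.bxor a (pvGapEnd R d a))) a (pvGapEnd R d a) hab hsign rfl]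
        have hsplit : PySem.List.pyRange a (R + 1) =
            PySem.List.pyRange a (pvGapEnd R d a + 1) ++ PySem.List.pyRange (pvGapEnd R d a + 1) (R + 1) :=
          pvRange_split ((pvGapEnd R d a + 1 - a).toNat) a (pvGapEnd R d a + 1) (R + 1) rfl (by omega) (by omega)
        have hfilter1 : (PySem.List.pyRange a (pvGapEnd R d a + 1)).filter (fun i => decide (PySem.Int.mod i m ≠ 0))
            = PySem.List.pyRange a (pvGapEnd R d a + 1) := by
          rw [List.filter_eq_self]
          intro i hi
          rw [PySem.List.mem_pyRange_one] at hi
          simp only [decide_eq_true_eq]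
          intro hmi
          exact hgap i hi.1 (by omega) ((PySem.Int.mod_eq_zero_iff_dvd i d).mp ((hdvd i).mpr hmi))
        have hfilter2 : (PySem.List.pyRange (pvGapEnd R d a + 1) (R + 1)).filter (fun i => decide (PySem.Int.mod i m ≠ 0))
            = (PySem.List.pyRange (pvGapEnd R d a + 2) (R + 1)).filter (fun i => decide (PySem.Int.mod i m ≠ 0)) := by
          by_cases hbR1 : pvGapEnd R d a + 1 ≤ R
          · have hdvdb1 : d ∣ (pvGapEnd R d a + 1) := ⟨PySem.Int.floordiv a d + 1, by rw [hbeq hbR1]; ring⟩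
            have hm0 : PySem.Int.mod (pvGapEnd R d a + 1) m = 0 :=
              (hdvd _).mp ((PySem.Int.mod_eq_zero_iff_dvd _ d).mpr hdvdb1)
            rw [PySem.List.pyRange_one_cons (by omega : pvGapEnd R d a + 1 < R + 1), List.filter_cons,
              if_neg (by simp [hm0] : ¬ decide (PySem.Int.mod (pvGapEnd R d a + 1) m ≠ 0) = true),
              show pvGapEnd R d a + 1 + 1 = pvGapEnd R d a + 2 by ring]
          · rw [pvRange_nil (by omega : R + 1 ≤ pvGapEnd R d a + 1),
              pvRange_nil (by omega : R + 1 ≤ pvGapEnd R d a + 2)]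
        rw [ih (pvGapEnd R d a + 2) (PySem.Int.band ans (pvRangeAnd a (pvGapEnd R d a))) (by omega), hsplit,
          List.filter_append, pvListAnd_append, hfilter1, ← hfilter2, hra, pvBand_assoc]

-- A's large-branch loop computes the closed form
theorem pvAndLoopA_spec (fuel : Nat) : ∀ (l r : Int) (sh : Nat), 0 ≤ PySem.Int.bxor l r →
    PySem.Int.bitLength (PySem.Int.bxor l r) ≤ fuel →
    pvAndLoopA fuel l r sh = (l >>> PySem.Int.bitLength (PySem.Int.bxor l r), sh + PySem.Int.bitLength (PySem.Int.bxor l r)) := by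
  induction fuel with
  | zero =>
    intro l r sh h0 hbl
    have h1 : PySem.Int.bitLength (PySem.Int.bxor l r) = 0 := by omega
    have h2 : (PySem.Int.bxor l r).natAbs < 1 := by
      have := PySem.Int.lt_two_pow_bitLength (PySem.Int.bxor l r)
      rw [h1] at this
      simpa using this
    have h3 : l = r := (pvBxor_eq_zero_iff l r).mp (by omega)
    subst h3
    simp only [pvAndLoopA, h1]
    simp [show l >>> (0:Nat) = l from by rw [Int.shiftRight_eq_div_pow]; simp]
  | succ fuel ih =>
    intro l r sh h0 hbl
    by_cases hlr : l = r
    · subst hlr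
      rw [show PySem.Int.bxor l l = 0 from PySem.Int.bxor_self l, PySem.Int.bitLength_zero]
      simp only [pvAndLoopA]
      simp [show l >>> (0:Nat) = l from by rw [Int.shiftRight_eq_div_pow]; simp]
    · simp only [pvAndLoopA, if_neg hlr]
      obtain ⟨u, p, hp, hu⟩ := pvParity l
      obtain ⟨v, q, hq, hv⟩ := pvParity r
      have hX : PySem.Int.bxor l r = 2 * PySem.Int.bxor u v + (if p = q then 0 else 1) := by
        rw [hu, hv]; exact pvBxor_double u v p q hp hq
      have hXpos : 0 < PySem.Int.bxor l r := by
        have : PySem.Int.bxor l r ≠ 0 := fun h => hlr ((pvBxor_eq_zero_iff l r).mp h)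
        omega
      have hY : 0 ≤ PySem.Int.bxor u v := by
        rcases hp with h | h <;> rcases hq with h' | h' <;> rw [h, h'] at hX <;> simp at hX <;> omega
      have hfd : PySem.Int.floordiv (PySem.Int.bxor l r) 2 = PySem.Int.bxor u v := by
        rw [PySem.Int.floordiv_eq_ediv_of_pos (by norm_num)]
        rcases hp with h | h <;> rcases hq with h' | h' <;> rw [h, h'] at hX <;> simp at hX <;> omega
      have hblrec : PySem.Int.bitLength (PySem.Int.bxor l r) = PySem.Int.bitLength (PySem.Int.bxor u v) + 1 := by
        have := PySem.Int.bitLength_of_pos hXpos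
        rw [hfd] at this
        exact this
      have hls : l >>> (1:Nat) = u := by
        simpa [show u >>> (0:Nat) = u from by rw [Int.shiftRight_eq_div_pow]; simp]
          using pvHalfShift 0 l u p hp hu
      have hrs : r >>> (1:Nat) = v := by
        simpa [show v >>> (0:Nat) = v from by rw [Int.shiftRight_eq_div_pow]; simp]
          using pvHalfShift 0 r v q hq hv
      rw [hls, hrs, ih u v (sh + 1) hY (by omega), hblrec,
        ← pvHalfShift (PySem.Int.bitLength (PySem.Int.bxor u v)) l u p hp hu,
        show sh + 1 + PySem.Int.bitLength (PySem.Int.bxor u v)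
          = sh + (PySem.Int.bitLength (PySem.Int.bxor u v) + 1) by omega]

-- ===== VERDICT (by name: the statement is the Claim_ definition above) =====
theorem bit003_and_skip_multiples_spec : Claim_equal_bit003_and_skip_multiples := by
  unfold Claim_equal_bit003_and_skip_multiples
  intro L R m hdom hpre
  unfold Spec_bit003_and_skip_multiples
  obtain ⟨hpre1, hpre2⟩ := hpre
  simp only [Dom_bit003_and_skip_multiples, pvDomInt, Bool.and_eq_true, decide_eq_true_eq] at hdom
  obtain ⟨⟨hLdom, hRdom⟩, hmdom⟩ := hdom
  by_cases hsmall : R - L ≤ 2000000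
  · simp only [bit003_and_skip_multiples, bit003_and_skip_multiples_alt, if_pos hsmall]
    rw [pvA_small m (PySem.List.pyRange L (R+1) 1)]
    by_cases hd1 : |m| = 1
    · rw [if_pos hd1]
      have hfil : (PySem.List.pyRange L (R+1) 1).filter (fun i => decide (PySem.Int.mod i m ≠ 0)) = [] := by
        rw [List.filter_eq_nil_iff]
        intro i _
        have : m ∣ i := (abs_dvd m i).mp (hd1 ▸ one_dvd i)
        simp [(PySem.Int.mod_eq_zero_iff_dvd i m).mpr this]
      rw [hfil]
      rfl
    · rw [if_neg hd1]
      by_cases hLR : L ≤ R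
      · have hm0 : m ≠ 0 := hpre1 hsmall hLR
        have h2 : 2 ≤ |m| := by
          have h0 := abs_nonneg m
          have h1 : |m| ≠ 0 := by simpa [abs_eq_zero] using hm0
          omega
        rw [pvGapLoop_spec m R |m| rfl h2 ((R + 1 - L).toNat + 1) L (-1) (Nat.lt_succ_self _),
          pvBand_neg_one_left]
      · have hfuel0 : (R + 1 - L).toNat = 0 := by omega
        rw [hfuel0]
        have hnil : PySem.List.pyRange L (R+1) 1 = [] := pvRange_nil (by omega)
        rw [hnil, List.filter_nil]
        simp only [pvGapLoop, if_neg hLR]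
        rfl
  · simp only [bit003_and_skip_multiples, bit003_and_skip_multiples_alt, if_neg hsmall]
    have hsign : (0 ≤ L ∧ 0 ≤ R) ∨ (L < 0 ∧ R < 0) := by
      rcases hpre2 (by omega) with h | h
      · left; exact ⟨h, by omega⟩
      · right; exact ⟨by omega, h⟩
    have hx0 : 0 ≤ PySem.Int.bxor L R := pvBxor_nonneg L R hsign
    have habs : (PySem.Int.bxor L R).natAbs < 2 ^ 64 :=
      pvBxor_natAbs_lt L R (by omega) (by omega)
    have hble : PySem.Int.bitLength (PySem.Int.bxor L R) ≤ 64 := pvBitLength_le habs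
    rw [pvAndLoopA_spec 64 L R 0 hx0 hble]
    have hguard : ¬ (L < 0 ∧ 0 ≤ R) := by rcases hsign with ⟨h1, h2⟩ | ⟨h1, h2⟩ <;> omega
    rw [pvRangeAnd, if_neg hguard]
    simp only [Nat.zero_add]
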